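-- pv_equiv track=rewrite | github.com/CatfishW/KGLLM | Core/train.py | _infer_cli_overrides
-- ===== SOURCE A (Python) =====
-- def _infer_cli_overrides(argv):
--     overrides = set()
--     i = 0
--     while i < len(argv):
--         token = argv[i]
--         if token.startswith('--'):
--             option = token
--             value_inline = '=' in option
--             if value_inline:
--                 option = option.split('=', 1)[0]
--             name = option.lstrip('-').replace('-', '_')
--             overrides.add(name)
--             if not value_inline and i + 1 < len(argv) and not argv[i + 1].startswith('--'):
--                 i += 2
--                 continue
--             i += 1
--             continue
--         i += 1
--     return overrides
-- ===== SOURCE B (Python) =====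
-- def _name(token):
--     chars = []
--     for c in token.lstrip('-'):
--         if c == '=':
--             break
--         chars.append('_' if c == '-' else c)
--     return ''.join(chars)
--
--
-- def _infer_cli_overrides(argv):
--     return {_name(t) for t in argv if t.startswith('--')}
-- ===== Notes on version B (the rewrite author's own statement) =====
-- stated objective: simpler
-- what changed: Replaced A's index/lookahead while-loop state machine by a single flat pass over every token (value tokens never start with '--' so skipping them is a no-op), and the split/lstrip/replace string pipeline by one character loop that strips leading dashes, stops at '=', and maps '-' to '_'.
import Mathlib
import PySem

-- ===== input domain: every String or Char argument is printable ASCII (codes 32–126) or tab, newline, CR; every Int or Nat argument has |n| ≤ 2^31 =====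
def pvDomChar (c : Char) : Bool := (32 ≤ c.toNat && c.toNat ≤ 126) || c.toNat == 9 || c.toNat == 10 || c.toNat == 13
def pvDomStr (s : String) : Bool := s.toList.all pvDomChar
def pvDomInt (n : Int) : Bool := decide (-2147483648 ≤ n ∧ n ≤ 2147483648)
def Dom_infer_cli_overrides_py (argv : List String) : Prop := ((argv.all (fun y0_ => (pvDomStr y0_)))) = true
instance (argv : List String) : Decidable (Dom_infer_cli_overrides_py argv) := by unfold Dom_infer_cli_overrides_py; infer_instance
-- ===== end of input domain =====

-- B replaces A's index/lookahead while loop by one flat pass over all tokens (simpler); same return value.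

-- ===== PORT A =====
-- name computation of A: option.lstrip('-').replace('-','_');
-- lstrip('-') is exactly dropWhile (· == '-'), and replace with single-char old/new is exactly a
-- character map (hand-ported, exact; PySem has no lstrip-with-chars primitive).
def aName (token : String) : String :=
  let valueInline := PySem.Str.isIn "=" token
  -- token.split('=',1)[0]: sep "=" is nonempty and split returns ≥ 1 piece, so the defaults are unreachable
  let option := if valueInline then ((PySem.Str.splitMax? token "=" 1).getD []).headD "" else token
  String.ofList ((option.toList.dropWhile (fun c => c == '-')).map (fun c => if c == '-' then '_' else c))

-- A's while loop over index i, advancing by 1 or 2, ported as recursion on the remaining suffix of argv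
def aLoop : List String → PySem.Set String → PySem.Set String
  | [], s => s
  | t :: rest, s =>
    if PySem.Str.startswith t "--" then
      let s' := PySem.Set.add s (aName t)
      if !(PySem.Str.isIn "=" t) then
        match rest with
        | u :: rest2 =>
          if !(PySem.Str.startswith u "--") then aLoop rest2 s'  -- i += 2
          else aLoop (u :: rest2) s'
        | [] => aLoop [] s'
      else aLoop rest s'
    else aLoop rest s

def infer_cli_overrides_py (argv : List String) : List String :=
  aLoop argv PySem.Set.empty

-- ===== PORT B =====
-- Source B's _name: loop over token.lstrip('-') breaking at '=', appending '_' for '-'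
def bChars : List Char → List Char
  | [] => []
  | c :: rest => if c == '=' then [] else (if c == '-' then '_' else c) :: bChars rest

def bName (token : String) : String :=
  String.ofList (bChars (token.toList.dropWhile (fun c => c == '-')))

-- Source B's set comprehension over all of argv, in order
def infer_cli_overrides_py_alt (argv : List String) : List String :=
  argv.foldl (fun s t => if PySem.Str.startswith t "--" then PySem.Set.add s (bName t) else s)
    PySem.Set.empty

-- ===== PRECONDITION & SPEC =====
def Spec_infer_cli_overrides_py (argv : List String) (out : List String) : Prop := out = infer_cli_overrides_py_alt argv
instance (argv : List String) (out : List String) : Decidable (Spec_infer_cli_overrides_py argv out) := by unfold Spec_infer_cli_overrides_py; infer_instance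

-- ===== CLAIM (what is proved, stated in full; the proofs are below) =====
def Claim_equal_infer_cli_overrides_py : Prop := ∀ (argv : List String), Dom_infer_cli_overrides_py argv → Spec_infer_cli_overrides_py argv (infer_cli_overrides_py argv)

-- ===== LEMMAS AND PROOFS =====

-- bChars is "truncate at '=' then map '-'→'_'"
theorem bChars_eq (l : List Char) :
    bChars l = (l.takeWhile (fun c => c != '=')).map (fun c => if c == '-' then '_' else c) := by
  induction l with
  | nil => rfl
  | cons c rest ih =>
    by_cases h : c = '='
    · simp [bChars, h]
    · simp [bChars, h, ih]

-- dropWhile dashes and takeWhile "not '='" commute (a dash is never '=')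
theorem drop_take_comm (l : List Char) :
    (l.takeWhile (fun c => c != '=')).dropWhile (fun c => c == '-')
      = (l.dropWhile (fun c => c == '-')).takeWhile (fun c => c != '=') := by
  induction l with
  | nil => rfl
  | cons c rest ih =>
    by_cases hd : c = '-'
    · simp [hd, ih]
    · by_cases he : c = '='
      · simp [he]
      · simp [hd, he]

-- head of splitOnMax.go with maxsplit exhausted: the first piece, already in acc
theorem go_zero_head (fuel : Nat) (l cur : List Char) (a : List Char) :
    (PySem.Chars.splitOnMax.go ['='] fuel 0 l cur [a]).headD [] = a := by
  cases fuel with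
  | zero => rfl
  | succ n => cases l <;> rfl

-- head of splitOnMax.go with maxsplit = 1 and enough fuel: cur.reverse ++ prefix of l before '='
theorem go_one_head (fuel : Nat) :
    ∀ (l cur : List Char), l.length ≤ fuel →
      (PySem.Chars.splitOnMax.go ['='] fuel 1 l cur []).headD []
        = cur.reverse ++ l.takeWhile (fun c => c != '=') := by
  induction fuel with
  | zero =>
    intro l cur h
    have : l = [] := List.eq_nil_of_length_eq_zero (Nat.le_zero.mp h)
    subst this; rfl
  | succ n ih =>
    intro l cur h
    cases l with
    | nil => simp [PySem.Chars.splitOnMax.go]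
    | cons c rest =>
      by_cases hc : c = '='
      · subst hc
        have hstep : PySem.Chars.splitOnMax.go ['='] (n+1) 1 ('=' :: rest) cur []
            = PySem.Chars.splitOnMax.go ['='] n 0 (List.drop 1 ('=' :: rest)) [] [cur.reverse] := by
          simp [PySem.Chars.splitOnMax.go, List.isPrefixOf]
        rw [hstep]
        simpa using go_zero_head n (List.drop 1 ('=' :: rest)) [] cur.reverse
      · have hpre : List.isPrefixOf ['='] (c :: rest) = false := by
          simp [List.isPrefixOf]
          exact fun he => hc he.symm
        have hstep : PySem.Chars.splitOnMax.go ['='] (n+1) 1 (c :: rest) cur []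
            = PySem.Chars.splitOnMax.go ['='] n 1 rest (c :: cur) [] := by
          simp [PySem.Chars.splitOnMax.go, hpre]
        rw [hstep, ih rest (c :: cur) (by simp at h; omega)]
        simp [hc]

-- the characters of A's `option` are exactly the prefix of the token before the first '='
theorem aOption_toList (t : String) :
    (if PySem.Str.isIn "=" t then ((PySem.Str.splitMax? t "=" 1).getD []).headD "" else t).toList
      = t.toList.takeWhile (fun c => c != '=') := by
  by_cases h : PySem.Str.isIn "=" t
  · rw [if_pos h]
    have hsplit : PySem.Str.splitMax? t "=" 1
        = some ((PySem.Chars.splitOnMax t.toList ['='] 1).map String.ofList) := by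
      simp [PySem.Str.splitMax?, PySem.Chars.splitMax?]
    rw [hsplit]
    have key : ∀ (r : List (List Char)), ((r.map String.ofList).headD "").toList = r.headD [] := by
      intro r; cases r <;> simp
    have hlen : t.toList.length = t.length := by simp
    have hgo : PySem.Chars.splitOnMax t.toList ['='] 1
        = PySem.Chars.splitOnMax.go ['='] (t.length + 1) 1 t.toList [] [] := by
      simp [PySem.Chars.splitOnMax]
    have hhead := go_one_head (t.length + 1) t.toList [] (by omega)
    simp only [Option.getD_some, key, hgo, hhead, List.reverse_nil, List.nil_append]
  · rw [if_neg h]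
    have hmem : ∀ a ∈ t.toList, a ≠ '=' := by
      intro a ha he
      subst he
      exact h (by
        rw [PySem.Str.isIn_iff_infix]
        exact (List.singleton_infix_iff '=' t.toList).mpr (by simpa using ha))
    exact (List.takeWhile_eq_self_iff.mpr (by simpa using hmem)).symm

-- the two name computations agree
theorem name_eq (t : String) : aName t = bName t := by
  simp only [aName, bName, bChars_eq]
  rw [← drop_take_comm, ← aOption_toList]

-- B's fold ignores a token that does not start with '--'
theorem foldl_skip (s : PySem.Set String) (u : String) (rest : List String)
    (h : PySem.Str.startswith u "--" = false) :
    (u :: rest).foldl (fun s t => if PySem.Str.startswith t "--" then PySem.Set.add s (bName t) else s) s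
      = rest.foldl (fun s t => if PySem.Str.startswith t "--" then PySem.Set.add s (bName t) else s) s := by
  rw [List.foldl_cons, if_neg (by simp only [h]; decide)]

-- main loop correspondence: A's while loop (advancing by 1 or 2) equals B's flat fold
theorem aLoop_eq_foldl (xs : List String) (s : PySem.Set String) :
    aLoop xs s
      = xs.foldl (fun s t => if PySem.Str.startswith t "--" then PySem.Set.add s (bName t) else s) s := by
  induction xs, s using aLoop.induct with
  | case1 s => rfl
  | case2 t s hstart s' hin u rest2 hu ih =>
    have hin' : PySem.Str.isIn "=" t = false := by simpa using hin
    have hu' : PySem.Str.startswith u "--" = false := by simpa using hu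
    rw [List.foldl_cons, if_pos hstart, foldl_skip _ u rest2 hu', ← name_eq, ← ih]
    rw [aLoop.eq_2, if_pos hstart]
    have hinC : PySem.Chars.isIn ['='] t.toList = false := by simpa using hin'
    have huC : PySem.Chars.startswith u.toList ['-', '-'] = false := by simpa using hu'
    simp [hinC, huC]
    rfl
  | case3 t s hstart s' hin u rest2 hu ih =>
    have hin' : PySem.Str.isIn "=" t = false := by simpa using hin
    have hu' : PySem.Str.startswith u "--" = true := by simpa using hu
    rw [List.foldl_cons, if_pos hstart, ← name_eq, ← ih]
    rw [aLoop.eq_2, if_pos hstart]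
    have hinC : PySem.Chars.isIn ['='] t.toList = false := by simpa using hin'
    have huC : PySem.Chars.startswith u.toList ['-', '-'] = true := by simpa using hu'
    simp [hinC, huC]
    rfl
  | case4 t s hstart s' hin ih =>
    have hin' : PySem.Str.isIn "=" t = false := by simpa using hin
    rw [List.foldl_cons, if_pos hstart, ← name_eq, ← ih]
    rw [aLoop.eq_2, if_pos hstart]
    have hinC : PySem.Chars.isIn ['='] t.toList = false := by simpa using hin'
    simp [hinC]
    rfl
  | case5 t rest s hstart s' hin ih =>
    have hin' : PySem.Str.isIn "=" t = true := by simpa using hin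
    rw [List.foldl_cons, if_pos hstart, ← name_eq, ← ih]
    rw [aLoop.eq_2, if_pos hstart]
    have hinC : PySem.Chars.isIn ['='] t.toList = true := by simpa using hin'
    simp [hinC]
    rfl
  | case6 t rest s hstart ih =>
    have h' : PySem.Str.startswith t "--" = false := by simpa using hstart
    rw [List.foldl_cons, if_neg (by simp only [h']; decide)]
    rw [aLoop.eq_2, if_neg (by simp only [h']; decide)]
    exact ih

-- ===== VERDICT (by name: the statement is the Claim_ definition above) =====
theorem infer_cli_overrides_py_spec : Claim_equal_infer_cli_overrides_py := by
  intro argv _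
  unfold Spec_infer_cli_overrides_py infer_cli_overrides_py infer_cli_overrides_py_alt
  exact aLoop_eq_foldl argv PySem.Set.empty
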